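-- pv_equiv track=rewrite | github.com/phoenixway/robin_assistant | ai_core.py | is_story_in_log_old
-- ===== SOURCE A (Python) =====
-- def contains_in_end(subseq, inseq):
--     if len(subseq) == 0:
--         return False
--     for i in range(len(subseq)):
--         if subseq[i] != inseq[len(inseq) - len(subseq) + i]:
--             return False
--     return True
--
-- def is_story_in_log_old(story, l):
--     result = False, -1
--     if len(l) > len(story):
--         i = len(story)
--         while i >= 0:
--             if contains_in_end(story[0:i], l):
--                 return True, i
--             # elif contains_in_end(story[0:i], l):
--             #     return True, i
--             i = i - 1
--     elif len(l) < len(story):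
--         i = len(l)
--         while i >= 0:
--             if contains_in_end(story[0:i], l):
--                 return True, i
--             i = i - 1
--     return result
-- ===== SOURCE B (Python) =====
-- def is_story_in_log_old(story, l):
--     # One-pass scan of l maintaining all active match lengths (prefixes of story
--     # that are suffixes of the part of l seen so far); equal lengths return (False, -1)
--     # exactly as the original's explicit branch structure does.
--     if len(story) == len(l):
--         return False, -1
--     m = min(len(story), len(l))
--     live = [0]
--     for c in l:
--         live = [i + 1 for i in live if i < m and story[i] == c] + [0]
--     best = max(live)
--     return (True, best) if best > 0 else (False, -1)
-- ===== Notes on version B (the rewrite author's own statement) =====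
-- stated objective: alternative
-- what changed: Instead of re-testing each candidate prefix length from scratch against the end of l (descending loop with a full element-wise suffix check per length), B makes a single left-to-right pass over l maintaining the list of all currently-active match lengths and takes the maximum at the end; the explicit equal-length branch returning (False, -1) is kept as in A.
import Mathlib
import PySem

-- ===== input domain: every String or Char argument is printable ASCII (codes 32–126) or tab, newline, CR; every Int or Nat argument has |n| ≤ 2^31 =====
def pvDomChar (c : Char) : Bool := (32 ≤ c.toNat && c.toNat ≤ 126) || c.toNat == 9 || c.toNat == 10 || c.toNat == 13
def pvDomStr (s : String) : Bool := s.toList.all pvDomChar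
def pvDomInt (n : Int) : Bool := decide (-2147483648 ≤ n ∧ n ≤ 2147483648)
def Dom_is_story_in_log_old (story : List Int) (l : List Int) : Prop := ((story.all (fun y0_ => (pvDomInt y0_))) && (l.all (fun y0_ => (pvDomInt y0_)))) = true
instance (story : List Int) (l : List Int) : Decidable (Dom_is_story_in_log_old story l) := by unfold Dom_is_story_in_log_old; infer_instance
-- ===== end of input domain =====

-- B replaces A's restart-from-scratch suffix tests (one full element-wise compare per candidate
-- length) by a single left-to-right pass over l that maintains the list of all active match
-- lengths; objective: alternative (same worst-case order, different traversal).

-- ===== PORT A =====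
-- contains_in_end: the early-return scan written as List.all over the same index range;
-- pyGet? is Python's exact (negative-wrapping) indexing.  In every call made by
-- is_story_in_log_old the indices are in range, so no IndexError arises.
def containsInEnd (subseq inseq : List Int) : Bool :=
  if subseq.length = 0 then false
  else (PySem.List.pyRange 0 (subseq.length : Int) 1).all fun i =>
    PySem.List.pyGet? subseq i == PySem.List.pyGet? inseq ((inseq.length : Int) - (subseq.length : Int) + i)

-- the `while i >= 0` countdown; the argument n stands for i + 1, so n = 0 is the fall-through
-- exit returning result = (False, -1)
def loopA (story l : List Int) : Nat → Bool × Int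
  | 0 => (false, -1)
  | n+1 =>
    if containsInEnd (PySem.List.slice story (some 0) (some (n : Int))) l then (true, (n : Int))
    else loopA story l n

def is_story_in_log_old (story : List Int) (l : List Int) : Bool × Int :=
  if l.length > story.length then loopA story l (story.length + 1)
  else if l.length < story.length then loopA story l (l.length + 1)
  else (false, -1)

-- ===== PORT B =====
-- one step of B's scan: `live = [i + 1 for i in live if i < m and story[i] == c] + [0]`
def stepB (story : List Int) (m : Nat) (live : List Nat) (c : Int) : List Nat :=
  ((live.filter fun i => decide (i < m) && (PySem.List.pyGet? story (i : Int) == some c)).map (· + 1)) ++ [0]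

def is_story_in_log_old_alt (story : List Int) (l : List Int) : Bool × Int :=
  if story.length = l.length then (false, -1)
  else
    let m := min story.length l.length
    let live := l.foldl (stepB story m) [0]
    -- max(live): live is never empty (every step appends 0), so the default is never used
    let best := (PySem.List.max? live id).getD 0
    if 0 < best then (true, (best : Int)) else (false, -1)

-- ===== PRECONDITION & SPEC =====
def Spec_is_story_in_log_old (story : List Int) (l : List Int) (out : Bool × Int) : Prop := out = is_story_in_log_old_alt story l
instance (story : List Int) (l : List Int) (out : Bool × Int) : Decidable (Spec_is_story_in_log_old story l out) := by unfold Spec_is_story_in_log_old; infer_instance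

-- ===== CLAIM (what is proved, stated in full; the proofs are below) =====
def Claim_equal_is_story_in_log_old : Prop := ∀ (story : List Int) (l : List Int), Dom_is_story_in_log_old story l → Spec_is_story_in_log_old story l (is_story_in_log_old story l)

-- ===== LEMMAS AND PROOFS =====

-- `story.take k` is a suffix of `p`, as a Bool
def sfxB (story p : List Int) (k : Nat) : Bool := decide (story.take k <:+ p)

-- the descending index list [n-1, …, 1, 0]
def Rlist (n : Nat) : List Nat := (List.range n).reverse

theorem boolExt {a b : Bool} (h : a = true ↔ b = true) : a = b := by
  cases a <;> cases b <;> simp_all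

theorem rlist_succ (n : Nat) : Rlist (n+1) = n :: Rlist n := by
  simp [Rlist, List.range_succ]

theorem rlist_succ_map (n : Nat) : Rlist (n+1) = (Rlist n).map (· + 1) ++ [0] := by
  simp [Rlist, List.range_succ_eq_map]

theorem rlist_pairwise (n : Nat) : (Rlist n).Pairwise (· > ·) := by
  simp only [Rlist, List.pairwise_reverse]
  exact List.pairwise_lt_range

theorem mem_rlist {n i : Nat} (h : i ∈ Rlist n) : i < n := by
  simpa [Rlist] using h

-- A's helper, characterised: on an in-range candidate it tests exactly
-- "k is positive and story.take k is a suffix of l"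
theorem lem_contains (story l : List Int) (k : Nat) (hk1 : k ≤ story.length) (hk2 : k ≤ l.length) :
    containsInEnd (story.take k) l = (decide (0 < k) && sfxB story l k) := by
  have hlen : (story.take k).length = k := by simp [List.length_take]; omega
  rcases Nat.eq_zero_or_pos k with hk0 | hkpos
  · subst hk0; simp [containsInEnd, sfxB]
  · apply boolExt
    unfold containsInEnd
    rw [if_neg (by omega : ¬ (story.take k).length = 0), hlen]
    simp only [List.all_eq_true, Bool.and_eq_true, decide_eq_true_eq, sfxB]
    constructor
    · intro hall
      refine ⟨hkpos, ?_⟩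
      have hdrop : l.drop (l.length - k) = story.take k := by
        apply List.ext_getElem
        · simp [hlen]; omega
        · intro i h1 h2
          have hik : i < k := by rw [hlen] at h2; exact h2
          have hmem : ((i : Nat) : Int) ∈ PySem.List.pyRange 0 (k : Int) 1 := by
            rw [PySem.List.mem_pyRange_one]
            exact ⟨by omega, by exact_mod_cast hik⟩
          have hthis := hall _ hmem
          have harith : ((l.length : Int) - (k : Int) + ((i : Nat) : Int)) = ((l.length - k + i : Nat) : Int) := by
            omega
          rw [harith, PySem.List.pyGet?_natCast, PySem.List.pyGet?_natCast] at hthis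
          have hlt : l.length - k + i < l.length := by omega
          rw [List.getElem?_eq_getElem h2, List.getElem?_eq_getElem hlt] at hthis
          simp only [beq_iff_eq, Option.some.injEq] at hthis
          rw [List.getElem_drop]
          exact hthis.symm
      exact (List.suffix_iff_eq_drop).mpr (by rw [hlen]; exact hdrop.symm)
    · rintro ⟨-, hsfx⟩
      have hdrop : story.take k = l.drop (l.length - k) := by
        have h := (List.suffix_iff_eq_drop).mp hsfx
        rw [hlen] at h; exact h
      intro i hmem
      rw [PySem.List.mem_pyRange_one] at hmem
      obtain ⟨h0, hik⟩ := hmem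
      obtain ⟨j, rfl⟩ : ∃ j : Nat, i = (j : Int) := ⟨i.toNat, by omega⟩
      have hj : j < k := by exact_mod_cast hik
      have h2 : j < (story.take k).length := by omega
      have hlt : l.length - k + j < l.length := by omega
      rw [show ((l.length : Int) - (k : Int) + (j : Int)) = ((l.length - k + j : Nat) : Int) by omega]
      rw [PySem.List.pyGet?_natCast, PySem.List.pyGet?_natCast]
      rw [List.getElem?_eq_getElem h2, List.getElem?_eq_getElem hlt]
      have hcong := congrArg (fun t => t[j]?) hdrop
      simp only [List.getElem?_drop] at hcong
      rw [List.getElem?_eq_getElem h2, List.getElem?_eq_getElem hlt] at hcong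
      simp only [Option.some.injEq] at hcong
      simp [hcong]

-- Python slice story[0:n]
theorem lem_slice0 (xs : List Int) (n : Nat) :
    PySem.List.slice xs (some 0) (some (n : Int)) = xs.take n := by
  simp [pysem]

-- the countdown loop, characterised as the head of a filtered descending list
theorem lem_loopA (story l : List Int) (n : Nat)
    (hn1 : n ≤ story.length + 1) (hn2 : n ≤ l.length + 1) :
    loopA story l n =
      (match ((Rlist n).filter fun k => decide (0 < k) && sfxB story l k).head? with
        | some k => (true, (k : Int))
        | none => (false, -1)) := by
  induction n with
  | zero => simp [loopA, Rlist]
  | succ n ih =>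
    rw [loopA, lem_slice0, lem_contains story l n (by omega) (by omega), rlist_succ]
    rw [List.filter_cons]
    by_cases h : (decide (0 < n) && sfxB story l n) = true
    · simp [h]
    · simp only [h]
      rw [ih (by omega) (by omega)]
      simp

-- suffix against a one-element extension
theorem lem_concat_sfx (xs ys : List Int) (a b : Int) :
    xs ++ [a] <:+ ys ++ [b] ↔ a = b ∧ xs <:+ ys := by
  rw [← List.reverse_prefix]
  simp only [List.reverse_append, List.reverse_singleton, List.singleton_append]
  rw [List.cons_prefix_cons, List.reverse_prefix]

-- pointwise transition: a prefix of length i+1 matches after reading c iff the prefix of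
-- length i matched before and story[i] = c
theorem lem_point (story p : List Int) (c : Int) (i : Nat) (hi : i < story.length) :
    sfxB story (p ++ [c]) (i+1) = (sfxB story p i && (PySem.List.pyGet? story ((i : Nat) : Int) == some c)) := by
  apply boolExt
  simp only [sfxB, Bool.and_eq_true, decide_eq_true_eq]
  rw [PySem.List.pyGet?_natCast, List.getElem?_eq_getElem hi]
  rw [List.take_add_one, List.getElem?_eq_getElem hi]
  simp only [Option.toList_some, beq_iff_eq, Option.some.injEq]
  rw [lem_concat_sfx]
  tauto

-- one fold step preserves the invariant "live = all matching lengths, in descending order"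
theorem lem_step (story p : List Int) (c : Int) (m : Nat) (hm : m ≤ story.length) :
    stepB story m ((Rlist (m+1)).filter (sfxB story p)) c
      = (Rlist (m+1)).filter (sfxB story (p ++ [c])) := by
  unfold stepB
  rw [List.filter_filter]
  conv_lhs => rw [rlist_succ]
  conv_rhs => rw [rlist_succ_map]
  have hdm : decide (m < m) = false := by simp
  have h0 : sfxB story (p ++ [c]) 0 = true := by simp [sfxB]
  simp only [List.filter_cons, List.filter_append, List.filter_map, List.filter_nil,
    hdm, h0, Bool.false_and, Bool.false_eq_true, if_false, if_true]
  congr 1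
  apply congrArg (List.map (· + 1))
  apply List.filter_congr
  intro i hmemi
  have hilt : i < m := mem_rlist hmemi
  simp only [Function.comp]
  rw [lem_point story p c i (by omega)]
  simp [hilt, Bool.and_comm]

-- the whole fold
theorem lem_fold (story : List Int) (m : Nat) (hm : m ≤ story.length) :
    ∀ (l' p : List Int),
      l'.foldl (stepB story m) ((Rlist (m+1)).filter (sfxB story p))
        = (Rlist (m+1)).filter (sfxB story (p ++ l')) := by
  intro l'
  induction l' with
  | nil => intro p; simp
  | cons c t ih =>
    intro p
    rw [List.foldl_cons, lem_step story p c m hm, ih (p ++ [c])]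
    simp

-- initial live list
theorem lem_init (story : List Int) (m : Nat) (hm : m ≤ story.length) :
    (Rlist (m+1)).filter (sfxB story []) = [0] := by
  induction m with
  | zero => simp [Rlist, List.range_succ, sfxB]
  | succ n ih =>
    rw [rlist_succ, List.filter_cons]
    have hlen1 : (story.take (n+1)).length = n+1 := by simp [List.length_take]; omega
    have hfalse : sfxB story [] (n+1) = false := by
      simp only [sfxB, decide_eq_false_iff_not]
      intro hsfx
      have h := hsfx.length_le
      rw [hlen1] at h
      simp only [List.length_nil] at h
      omega
    rw [hfalse]
    simp only [Bool.false_eq_true, if_false]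
    exact ih (by omega)

-- Python max of a strictly descending list is its head
theorem lem_max_aux (a : Nat) (t : List Nat) (h : ∀ y ∈ t, y < a) :
    PySem.List.max? (a :: t) id = some a := by
  induction t generalizing a with
  | nil => rfl
  | cons y t ih =>
    have hy : y < a := h y (by simp)
    have hstep : PySem.List.max? (a :: y :: t) id = PySem.List.max? (a :: t) id := by
      simp only [PySem.List.max?, List.foldl_cons]
      congr 1
      rw [if_neg (show ¬ id a < id y by simp only [id_eq]; omega)]
    rw [hstep]
    exact ih a (fun z hz => h z (by simp [hz]))

theorem lem_head_max (xs : List Nat) (h : xs.Pairwise (· > ·)) :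
    PySem.List.max? xs id = xs.head? := by
  cases xs with
  | nil => rfl
  | cons a t =>
    rw [List.head?_cons]
    exact lem_max_aux a t (fun y hy => (List.pairwise_cons.mp h).1 y hy)

-- relate A's filter (positive candidates only) to B's filter (0 always alive)
theorem lem_pos_filter (S : Nat → Bool) (xs : List Nat) (h : xs.Pairwise (· > ·)) :
    ((xs.filter fun k => decide (0 < k) && S k).head?) =
      (match (xs.filter S).head? with
        | some k => if 0 < k then some k else none
        | none => none) := by
  induction xs with
  | nil => rfl
  | cons x t ih =>
    have hp := List.pairwise_cons.mp h
    rw [List.filter_cons, List.filter_cons]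
    by_cases hx : 0 < x
    · by_cases hS : S x = true
      · rw [if_pos (by simp [hS, hx]), if_pos (by simp [hS])]
        simp [hx]
      · rw [if_neg (by simp [hS]), if_neg (by simp [hS])]
        exact ih hp.2
    · have hx0 : x = 0 := by omega
      subst hx0
      have ht : t = [] := by
        cases t with
        | nil => rfl
        | cons y t' => exact absurd (hp.1 y (by simp)) (by omega)
      subst ht
      by_cases hS : S 0 = true
      · simp [hS]
      · simp [hS]

-- assembled characterisation of B on unequal lengths
theorem lem_all (story l : List Int) (m : Nat) (hm1 : m ≤ story.length) (hm2 : m ≤ l.length) :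
    loopA story l (m+1) =
      (match ((Rlist (m+1)).filter (sfxB story l)).head? with
        | some k => if 0 < k then (true, (k : Int)) else (false, -1)
        | none => (false, -1)) := by
  rw [lem_loopA story l (m+1) (by omega) (by omega)]
  rw [lem_pos_filter (sfxB story l) (Rlist (m+1)) (rlist_pairwise (m+1))]
  cases hh : ((Rlist (m+1)).filter (sfxB story l)).head? with
  | none => simp
  | some k =>
    by_cases hk : 0 < k <;> simp [hk]

theorem lem_b (story l : List Int) (m : Nat) (hm1 : m ≤ story.length) (_hm2 : m ≤ l.length) :
    (PySem.List.max? (l.foldl (stepB story m) [0]) id).getD 0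
      = (((Rlist (m+1)).filter (sfxB story l)).head?).getD 0 := by
  have h0 : ([0] : List Nat) = (Rlist (m+1)).filter (sfxB story []) := (lem_init story m hm1).symm
  rw [h0, lem_fold story m hm1 l [], List.nil_append]
  rw [lem_head_max _ ((rlist_pairwise (m+1)).filter _)]

theorem lem_main (story l : List Int) (m : Nat) (hm1 : m ≤ story.length) (hm2 : m ≤ l.length) :
    loopA story l (m+1) =
      (if 0 < (PySem.List.max? (l.foldl (stepB story m) [0]) id).getD 0
       then (true, (((PySem.List.max? (l.foldl (stepB story m) [0]) id).getD 0 : Nat) : Int))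
       else (false, -1)) := by
  rw [lem_all story l m hm1 hm2, lem_b story l m hm1 hm2]
  cases hh : ((Rlist (m+1)).filter (sfxB story l)).head? with
  | none => simp
  | some k => by_cases hk : 0 < k <;> simp [hk]

-- ===== VERDICT (by name: the statement is the Claim_ definition above) =====
theorem is_story_in_log_old_spec : Claim_equal_is_story_in_log_old := by
  intro story l _
  show is_story_in_log_old story l = is_story_in_log_old_alt story l
  unfold is_story_in_log_old is_story_in_log_old_alt
  rcases Nat.lt_trichotomy story.length l.length with hlt | heq | hgt
  · rw [if_pos (show l.length > story.length by omega), if_neg (show ¬ story.length = l.length by omega)]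
    have hmin : min story.length l.length = story.length := by omega
    rw [hmin]
    exact lem_main story l story.length (le_refl _) (by omega)
  · rw [if_neg (show ¬ l.length > story.length by omega), if_neg (show ¬ l.length < story.length by omega),
       if_pos heq]
  · rw [if_neg (show ¬ l.length > story.length by omega), if_pos (show l.length < story.length by omega),
       if_neg (show ¬ story.length = l.length by omega)]
    have hmin : min story.length l.length = l.length := by omega
    rw [hmin]
    exact lem_main story l l.length (by omega) (le_refl _)
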